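-- pv_equiv track=rewrite | github.com/pypi-data/pypi-mirror-399 | packages/clabtoolkit/clabtoolkit-0.4.0.tar.gz/clabtoolkit-0.4.0/clabtoolkit/visualization_utils.py | get_plot_config_dimensions
-- ===== SOURCE A (Python) =====
-- def get_plot_config_dimensions(limits: dict) -> tuple:
--     """
--     Get the number of objects, surfaces, and views from the limits dictionary.
--
--     Parameters
--     ----------
--     limits : dict
--         Dictionary where keys are (n_obj, n_surf, n_view) tuples.
--
--     Returns
--     -------
--     tuple
--         Tuple containing (n_obj, n_surf, n_view).
--     Raises
--     ------
--     ValueError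
--         If limits dictionary is empty.
--
--     ValueError
--         If keys in limits dictionary are not tuples of length 3.
--
--     """
--     if not limits:
--         raise ValueError("Limits dictionary is empty.")
--
--     for key in limits.keys():
--         if not (isinstance(key, tuple) and len(key) == 3):
--             raise ValueError("Keys in limits dictionary must be tuples of length 3.")
--
--     #
--     tuples_list = list(limits.keys())
--     result = tuple(max(values) for values in zip(*tuples_list))
--
--     n_map = result[0] + 1
--     n_surf = result[1] + 1
--     n_view = result[2] + 1
--
--     return (n_map, n_surf, n_view)
-- ===== SOURCE B (Python) =====
-- def get_plot_config_dimensions(limits: dict) -> tuple: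
--     """Single row-major pass: validate each key and update three running maxima."""
--     if not limits:
--         raise ValueError("Limits dictionary is empty.")
--     m0 = m1 = m2 = None
--     for key in limits.keys():
--         if not (isinstance(key, tuple) and len(key) == 3):
--             raise ValueError("Keys in limits dictionary must be tuples of length 3.")
--         a, b, c = key
--         if m0 is None:
--             m0, m1, m2 = a, b, c
--         else:
--             if a > m0:
--                 m0 = a
--             if b > m1:
--                 m1 = b
--             if c > m2:
--                 m2 = c
--     return (m0 + 1, m1 + 1, m2 + 1)
-- ===== Notes on version B (the rewrite author's own statement) =====
-- stated objective: simpler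
-- what changed: Replaces the two-phase validate-then-zip-transpose-and-column-max strategy with a single row-major loop that validates each key and updates three running maxima seeded from the first key.
import Mathlib
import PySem

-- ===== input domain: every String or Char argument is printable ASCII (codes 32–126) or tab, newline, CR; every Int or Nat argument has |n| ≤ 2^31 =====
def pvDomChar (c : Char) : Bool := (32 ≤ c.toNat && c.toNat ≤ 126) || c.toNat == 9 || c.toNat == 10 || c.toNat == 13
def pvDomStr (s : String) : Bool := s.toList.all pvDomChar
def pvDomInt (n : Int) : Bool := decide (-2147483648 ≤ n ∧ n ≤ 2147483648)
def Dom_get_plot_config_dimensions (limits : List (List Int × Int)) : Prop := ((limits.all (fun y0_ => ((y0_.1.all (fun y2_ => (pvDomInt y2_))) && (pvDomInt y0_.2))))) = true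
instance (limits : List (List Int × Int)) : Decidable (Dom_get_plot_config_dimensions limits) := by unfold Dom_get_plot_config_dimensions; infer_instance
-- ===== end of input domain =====

-- B replaces A's validate-then-zip-transpose-and-column-max strategy by one row-major pass with three running maxima; same values on Pre_.

-- ===== PORT A =====
-- zip(*rows) on Int rows: Python's zip stops at the shortest row; fuel = first row's length suffices
def pvZipGo : Nat → List (List Int) → List (List Int)
  | 0, _ => []
  | n+1, rows =>
    if rows.any (fun r => r.isEmpty) then []
    else rows.map (fun r => r.headD 0) :: pvZipGo n (rows.map (fun r => r.tail))

def pvZipStar (rows : List (List Int)) : List (List Int) :=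
  match rows with
  | [] => []
  | r :: rs => pvZipGo r.length (r :: rs)

def get_plot_config_dimensions (limits : List (List Int × Int)) : List Int :=
  let tuples_list := limits.map Prod.fst
  let result := (pvZipStar tuples_list).map (fun values => (PySem.List.max? values (fun y => y)).getD 0)
  [((PySem.List.pyGet? result 0).getD 0) + 1,
   ((PySem.List.pyGet? result 1).getD 0) + 1,
   ((PySem.List.pyGet? result 2).getD 0) + 1]

-- ===== PORT B =====
def pvAltStep (st : Option (Int × Int × Int)) (kv : List Int × Int) : Option (Int × Int × Int) :=
  match kv.1 with
  | [a, b, c] =>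
    match st with
    | none => some (a, b, c)
    | some (m0, m1, m2) =>
        some (if a > m0 then a else m0, if b > m1 then b else m1, if c > m2 then c else m2)
  | _ => st

def get_plot_config_dimensions_alt (limits : List (List Int × Int)) : List Int :=
  match limits.foldl pvAltStep none with
  | some (m0, m1, m2) => [m0 + 1, m1 + 1, m2 + 1]
  | none => []

-- ===== PRECONDITION & SPEC =====
-- A raises ValueError on an empty dict and on any key that is not a 3-tuple; Pre_ excludes exactly those inputs.
def Pre_get_plot_config_dimensions (limits : List (List Int × Int)) : Prop :=
  limits ≠ [] ∧ ∀ kv ∈ limits, kv.1.length = 3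
instance (limits : List (List Int × Int)) : Decidable (Pre_get_plot_config_dimensions limits) := by
  unfold Pre_get_plot_config_dimensions; infer_instance

def pvWitness_get_plot_config_dimensions : (List (List Int × Int)) := [([0, 2, 1], 7), ([3, 0, 0], 4)]

def Spec_get_plot_config_dimensions (limits : List (List Int × Int)) (out : List Int) : Prop := out = get_plot_config_dimensions_alt limits
instance (limits : List (List Int × Int)) (out : List Int) : Decidable (Spec_get_plot_config_dimensions limits out) := by unfold Spec_get_plot_config_dimensions; infer_instance

-- ===== CLAIM (what is proved, stated in full; the proofs are below) =====
def Claim_equal_get_plot_config_dimensions : Prop := ∀ (limits : List (List Int × Int)), Dom_get_plot_config_dimensions limits → Pre_get_plot_config_dimensions limits → Spec_get_plot_config_dimensions limits (get_plot_config_dimensions limits)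

-- ===== LEMMAS AND PROOFS =====

lemma max_if (m a : Int) : (if a > m then a else m) = max m a := by
  split <;> omega

lemma zipGo3 (rows : List (List Int)) (h : ∀ r ∈ rows, r.length = 3) :
    pvZipGo 3 rows =
      [rows.map (fun r => r.headD 0),
       rows.map (fun r => r.tail.headD 0),
       rows.map (fun r => r.tail.tail.headD 0)] := by
  have h1 : rows.any (fun r => r.isEmpty) = false := by
    simp only [List.any_eq_false]
    intro r hr
    have := h r hr
    simp [List.isEmpty_iff]
    intro e; subst e; simp at this
  have h2 : (rows.map (fun r => r.tail)).any (fun r => r.isEmpty) = false := by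
    simp only [List.any_eq_false, List.mem_map]
    rintro r ⟨s, hs, rfl⟩
    have := h s hs
    simp [List.isEmpty_iff, ← List.length_eq_zero_iff]
    omega
  have h3 : (rows.map (fun r => r.tail.tail)).any (fun r => r.isEmpty) = false := by
    simp only [List.any_eq_false, List.mem_map]
    rintro r ⟨t, ht, rfl⟩
    have := h t ht
    simp [List.isEmpty_iff, ← List.length_eq_zero_iff]
    omega
  simp only [pvZipGo, List.map_map, Function.comp_def, h1, h2, h3, Bool.false_eq_true, if_false]

lemma foldl_alt (rest : List (List Int × Int)) (h : ∀ kv ∈ rest, kv.1.length = 3)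
    (m0 m1 m2 : Int) :
    rest.foldl pvAltStep (some (m0, m1, m2)) =
      some ((rest.map (fun kv => kv.1.headD 0)).foldl max m0,
            (rest.map (fun kv => kv.1.tail.headD 0)).foldl max m1,
            (rest.map (fun kv => kv.1.tail.tail.headD 0)).foldl max m2) := by
  induction rest generalizing m0 m1 m2 with
  | nil => simp
  | cons kv rest ih =>
    obtain ⟨k, v⟩ := kv
    have hk : k.length = 3 := h (k, v) (by simp)
    rcases k with _ | ⟨a, k⟩; · simp at hk
    rcases k with _ | ⟨b, k⟩; · simp at hk
    rcases k with _ | ⟨c, k⟩; · simp at hk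
    rcases k with _ | ⟨d, k⟩
    · simp only [List.foldl_cons, List.map_cons]
      rw [show pvAltStep (some (m0, m1, m2)) ([a, b, c], v) =
            some (max m0 a, max m1 b, max m2 c) by simp [pvAltStep, max_if]]
      exact ih (fun x hx => h x (by simp [hx])) _ _ _
    · simp at hk

-- ===== VERDICT (by name: the statement is the Claim_ definition above) =====
theorem get_plot_config_dimensions_spec : Claim_equal_get_plot_config_dimensions := by
  intro limits _ hpre
  obtain ⟨hne, hlen⟩ := hpre
  rcases limits with _ | ⟨⟨k, v⟩, rest⟩
  · exact absurd rfl hne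
  have hk : k.length = 3 := hlen (k, v) (by simp)
  rcases k with _ | ⟨a, k⟩; · simp at hk
  rcases k with _ | ⟨b, k⟩; · simp at hk
  rcases k with _ | ⟨c, k⟩; · simp at hk
  rcases k with _ | ⟨d, k⟩
  case cons.cons.cons.cons.cons => simp at hk
  have hrest : ∀ x ∈ rest, x.1.length = 3 := fun x hx => hlen x (by simp [hx])
  have hall : ∀ r ∈ ([a, b, c] : List Int) :: rest.map Prod.fst, r.length = 3 := by
    rintro r hr
    rcases List.mem_cons.mp hr with rfl | hr
    · rfl
    · obtain ⟨x, hx, rfl⟩ := List.mem_map.mp hr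
      exact hlen x (by simp [hx])
  unfold Spec_get_plot_config_dimensions get_plot_config_dimensions get_plot_config_dimensions_alt
  simp only [List.foldl_cons]
  rw [show pvAltStep none ([a, b, c], v) = some (a, b, c) from rfl]
  rw [foldl_alt rest hrest]
  have hz : pvZipStar ((([a, b, c], v) :: rest).map Prod.fst) =
      [(([a, b, c] : List Int) :: rest.map Prod.fst).map (fun r => r.headD 0),
       (([a, b, c] : List Int) :: rest.map Prod.fst).map (fun r => r.tail.headD 0),
       (([a, b, c] : List Int) :: rest.map Prod.fst).map (fun r => r.tail.tail.headD 0)] := by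
    simp only [List.map_cons, pvZipStar]
    exact zipGo3 _ hall
  rw [hz]
  simp [PySem.List.pyGet?, PySem.List.pyIdx?, PySem.List.max?_id_cons, List.map_map,
    Function.comp_def]
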